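-- pv_equiv track=rewrite | github.com/LyFX5/Other_Interesting | Algorithms/cscT1NOD.py | csc1
-- ===== SOURCE A (Python) =====
-- def nod(a,b):
--     r = b%a
--     if r == 0:
--         return a
--     else:
--         return nod(r,a)
--
-- def csc1(n):
--     s = 0
--     nods = []
--     for i in range(1,n):
--         for j in range(i+1,n):
--             a = 2**i + 1
--             b = 2**j + 1
--             q = nod(a,b)
--             if q not in nods:
--                 s = s + q
--                 nods.append(q)
--     return s
-- ===== SOURCE B (Python) =====
-- def csc1(n):
--     # gcd(2**i+1, 2**j+1) is 2**g+1 (g = gcd(i,j)) when i/g and j/g are both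
--     # odd, and 1 otherwise.  Over 1 <= i < j < n the attainable values are
--     # exactly {1} plus {2**g+1 : 1 <= g <= (n-1)//3}, so the sum of the
--     # distinct values has a closed form.
--     if n <= 2:
--         return 0
--     m = (n - 1) // 3
--     return 1 + m + (2 ** (m + 1) - 2)
-- ===== Notes on version B (the rewrite author's own statement) =====
-- stated objective: faster
-- what changed: Replaces the O(n^2) pair scan with Euclidean gcds over huge numbers 2^i+1 by a closed form: the distinct gcd values are exactly {1} and {2^g+1 : 1 <= g <= (n-1)//3}, whose sum is 1 + m + 2^(m+1) - 2 with m = (n-1)//3.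
import Mathlib
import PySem

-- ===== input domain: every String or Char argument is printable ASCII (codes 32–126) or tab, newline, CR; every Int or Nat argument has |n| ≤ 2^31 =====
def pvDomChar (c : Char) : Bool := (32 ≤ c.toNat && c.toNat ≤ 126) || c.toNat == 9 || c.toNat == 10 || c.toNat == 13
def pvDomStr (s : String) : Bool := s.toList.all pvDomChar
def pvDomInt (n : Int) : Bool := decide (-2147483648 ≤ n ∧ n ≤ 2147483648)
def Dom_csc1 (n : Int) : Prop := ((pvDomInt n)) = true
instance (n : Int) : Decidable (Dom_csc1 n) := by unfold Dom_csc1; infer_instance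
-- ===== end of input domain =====

-- B replaces A's nested pair scan (Euclidean gcds of the numbers 2^i+1) by a closed form for
-- the sum of the distinct gcd values {1} ∪ {2^g+1 : 1 ≤ g ≤ (n-1)//3}; objective: faster.


-- ===== PORT A =====
-- nod(a,b): Python's recursive Euclid with r = b % a (PySem.Int.mod = Python %).
-- The dite guard only makes the recursion total: whenever a ≠ 0, Python's % guarantees
-- |r| < |a| so the guard is true; csc1 below only ever calls nod with a ≥ 3.
def nod (a b : Int) : Int :=
  let r := PySem.Int.mod b a
  if r = 0 then a
  else if h : r.natAbs < a.natAbs then nod r a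
  else a
termination_by a.natAbs
decreasing_by exact h

def csc1 (n : Int) : Int :=
  (((PySem.List.pyRange 1 n 1).foldl (fun st i =>
      (PySem.List.pyRange (i + 1) n 1).foldl (fun st j =>
        let a := (2 : Int) ^ i.toNat + 1   -- 2**i (i ≥ 1 on every iteration, so toNat is exact)
        let b := (2 : Int) ^ j.toNat + 1   -- 2**j
        let q := nod a b
        if q ∈ st.2 then st else (st.1 + q, st.2 ++ [q])) st)
      ((0 : Int), ([] : List Int)))).1

-- ===== PORT B =====
def csc1_alt (n : Int) : Int :=
  if n ≤ 2 then 0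
  else
    let m := PySem.Int.floordiv (n - 1) 3
    1 + m + (2 ^ (m + 1).toNat - 2)   -- 2**(m+1) (m ≥ 0 here, so toNat is exact)

-- ===== PRECONDITION & SPEC =====
def Spec_csc1 (n : Int) (out : Int) : Prop := out = csc1_alt n
instance (n : Int) (out : Int) : Decidable (Spec_csc1 n out) := by unfold Spec_csc1; infer_instance

-- ===== CLAIM (what is proved, stated in full; the proofs are below) =====
def Claim_equal_csc1 : Prop := ∀ (n : Int), Dom_csc1 n → Spec_csc1 n (csc1 n)

-- ===== LEMMAS AND PROOFS =====

-- the per-pair value and the flattened list of values that A's double loop visits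
def qf (i j : Int) : Int := nod ((2 : Int) ^ i.toNat + 1) ((2 : Int) ^ j.toNat + 1)

def qsL (n : Int) : List Int :=
  (PySem.List.pyRange 1 n 1).flatMap (fun i => (PySem.List.pyRange (i + 1) n 1).map (fun j => qf i j))

def step (st : Int × List Int) (q : Int) : Int × List Int :=
  if q ∈ st.2 then st else (st.1 + q, st.2 ++ [q])

-- the set of distinct values A's loop ever sees
def targetF (n : Int) : Finset Int :=
  if 3 ≤ n then insert 1 ((Finset.Icc 1 ((n - 1) / 3).toNat).image (fun g : ℕ => (2 : Int) ^ g + 1))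
  else ∅

-- ---- nod computes the (positive) gcd ----

theorem gcd_emod_left (a b : ℤ) : Int.gcd (b % a) a = Int.gcd a b := by
  rw [Int.emod_def, Int.gcd_comm (b - a * (b / a)) a]
  exact Int.gcd_sub_mul_left_right a b (b / a)

theorem nod_eq (a b : ℤ) (ha : 0 < a) : nod a b = Int.gcd a b := by
  rw [nod]
  have hm : PySem.Int.mod b a = b % a := PySem.Int.mod_eq_emod_of_pos ha
  by_cases h0 : PySem.Int.mod b a = 0
  · have hd : a ∣ b := Int.dvd_of_emod_eq_zero (by rw [← hm]; exact h0)
    rw [if_pos h0, Int.gcd_eq_natAbs_left hd, Int.natAbs_of_nonneg ha.le]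
  · have hrpos : 0 < PySem.Int.mod b a := by
      rw [hm]; rcases (Int.emod_nonneg b ha.ne').lt_or_eq with h | h
      · exact h
      · exact absurd (by rw [hm] at h0; omega) h0
    have hlt : (PySem.Int.mod b a).natAbs < a.natAbs := by
      have := Int.emod_lt_of_pos b ha; omega
    rw [if_neg h0, dif_pos hlt, nod_eq _ _ hrpos, hm, gcd_emod_left]
termination_by a.natAbs
decreasing_by exact hlt

-- ---- the number-theoretic identity gcd(2^a+1, 2^b+1) = 2^gcd(a,b)+1 or 1, in ℕ ----

theorem two_pow_add_one_dvd (g k : ℕ) (hk : Odd k) : 2 ^ g + 1 ∣ 2 ^ (g * k) + 1 := by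
  have := Odd.nat_add_dvd_pow_add_pow (x := 2 ^ g) (y := 1) hk
  simpa [← pow_mul] using this

theorem two_pow_add_one_dvd_sub (a : ℕ) : 2 ^ a + 1 ∣ 2 ^ (2 * a) - 1 := by
  refine ⟨2 ^ a - 1, ?_⟩
  have hx : 1 ≤ 2 ^ a := Nat.one_le_two_pow
  zify [hx, Nat.one_le_two_pow (n := 2 * a)]
  rw [two_mul, pow_add]
  ring

theorem two_pow_sub_one_dvd (m k : ℕ) : 2 ^ m - 1 ∣ 2 ^ (m * k) - 1 := by
  have := Nat.sub_dvd_pow_sub_pow (2 ^ m) 1 k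
  simpa [← pow_mul] using this

theorem gcd_two_pow (a b : ℕ) (ha : 1 ≤ a) (hb : 1 ≤ b) :
    Nat.gcd (2 ^ a + 1) (2 ^ b + 1) =
      if Odd (a / Nat.gcd a b) ∧ Odd (b / Nat.gcd a b) then 2 ^ Nat.gcd a b + 1 else 1 := by
  set g := Nat.gcd a b with hg
  have hg0 : 0 < g := Nat.gcd_pos_of_pos_left b (by omega)
  have hga : g ∣ a := Nat.gcd_dvd_left a b
  have hgb : g ∣ b := Nat.gcd_dvd_right a b
  set d := Nat.gcd (2 ^ a + 1) (2 ^ b + 1) with hd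
  have hda : d ∣ 2 ^ a + 1 := Nat.gcd_dvd_left _ _
  have hdb : d ∣ 2 ^ b + 1 := Nat.gcd_dvd_right _ _
  have hodd : Odd d := by
    rcases Nat.even_or_odd d with he | ho
    · exfalso
      have h2 : 2 ∣ 2 ^ a + 1 := dvd_trans he.two_dvd hda
      have : 2 ∣ 2 ^ a := dvd_pow_self 2 (by omega)
      omega
    · exact ho
  -- d divides 2^(2g) - 1
  have hkey : d ∣ 2 ^ (2 * g) - 1 := by
    have h1 : d ∣ 2 ^ (2 * a) - 1 := dvd_trans hda (two_pow_add_one_dvd_sub a)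
    have h2 : d ∣ 2 ^ (2 * b) - 1 := dvd_trans hdb (two_pow_add_one_dvd_sub b)
    have := Nat.dvd_gcd h1 h2
    rwa [Nat.pow_sub_one_gcd_pow_sub_one, Nat.gcd_mul_left] at this
  -- if the quotient of x by g is even, then d = 1
  have heven : ∀ x : ℕ, 1 ≤ x → g ∣ x → d ∣ 2 ^ x + 1 → ¬ Odd (x / g) → d = 1 := by
    intro x hx hgx hdx hodd_x
    have hx2 : 2 * g ∣ x := by
      obtain ⟨u, hu⟩ := hgx
      have : 2 ∣ u := by
        rcases Nat.even_or_odd u with he | ho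
        · exact he.two_dvd
        · exact absurd (by rw [hu, Nat.mul_div_cancel_left u hg0]; exact ho) hodd_x
      obtain ⟨w, hw⟩ := this
      exact ⟨w, by rw [hu, hw]; ring⟩
    obtain ⟨k, hk⟩ := hx2
    have h1 : d ∣ 2 ^ x - 1 := by
      have := two_pow_sub_one_dvd (2 * g) k
      rw [← hk] at this
      exact dvd_trans hkey this
    have h2 : d ∣ 2 := by
      have := Nat.dvd_sub hdx h1
      have hpow : 1 ≤ 2 ^ x := Nat.one_le_two_pow
      have heq : 2 ^ x + 1 - (2 ^ x - 1) = 2 := by omega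
      rwa [heq] at this
    obtain ⟨c, hc⟩ := hodd
    have := Nat.le_of_dvd (by norm_num) h2
    omega
  by_cases hcase : Odd (a / g) ∧ Odd (b / g)
  · rw [if_pos hcase]
    obtain ⟨hu, hv⟩ := hcase
    -- lower bound: 2^g+1 divides both
    have hla : 2 ^ g + 1 ∣ 2 ^ a + 1 := by
      have := two_pow_add_one_dvd g (a / g) hu
      rwa [Nat.mul_div_cancel' hga] at this
    have hlb : 2 ^ g + 1 ∣ 2 ^ b + 1 := by
      have := two_pow_add_one_dvd g (b / g) hv
      rwa [Nat.mul_div_cancel' hgb] at this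
    have hlow : 2 ^ g + 1 ∣ d := Nat.dvd_gcd hla hlb
    -- upper bound: d ∣ 2^a - 2^g and hence d ∣ 2^g + 1
    have hup : d ∣ 2 ^ g + 1 := by
      have h2g : 2 * g ∣ a - g := by
        obtain ⟨u, hu'⟩ := hga
        have hq : a / g = u := by rw [hu', Nat.mul_div_cancel_left u hg0]
        obtain ⟨c, hc⟩ := hu
        rw [hq] at hc
        refine ⟨c, ?_⟩
        rw [hu', hc]
        have h1 : g * (2 * c + 1) = 2 * g * c + g := by ring
        have h2' : 2 * g * c + g - g = 2 * g * c := by omega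
        rw [h1, h2']
      obtain ⟨k, hk⟩ := h2g
      have h1 : d ∣ 2 ^ (a - g) - 1 := by
        have := two_pow_sub_one_dvd (2 * g) k
        rw [← hk] at this
        exact dvd_trans hkey this
      have h2 : d ∣ 2 ^ a - 2 ^ g := by
        have := Dvd.dvd.mul_left h1 (2 ^ g)
        have heq : 2 ^ g * (2 ^ (a - g) - 1) = 2 ^ a - 2 ^ g := by
          have hga' : g ≤ a := Nat.le_of_dvd (by omega) hga
          have h1le : 1 ≤ 2 ^ (a - g) := Nat.one_le_two_pow
          rw [Nat.mul_sub, mul_one, ← pow_add]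
          congr 2
          omega
        rwa [heq] at this
      have := Nat.dvd_sub hda h2
      have hle : 2 ^ g ≤ 2 ^ a := Nat.pow_le_pow_right (by omega) (Nat.le_of_dvd (by omega) hga)
      have heq : 2 ^ a + 1 - (2 ^ a - 2 ^ g) = 2 ^ g + 1 := by
        generalize hX : 2 ^ a = X at *
        generalize hY : 2 ^ g = Y at *
        omega
      rwa [heq] at this
    exact Nat.dvd_antisymm hup hlow
  · rw [if_neg hcase]
    rcases Decidable.not_and_iff_or_not.mp hcase with h | h
    · exact heven a ha hga hda h
    · exact heven b hb hgb hdb h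

-- ---- A's double loop, flattened to one fold over the list of pair values ----

theorem foldl_ext {α σ : Type} (f g : σ → α → σ) (h : ∀ st x, f st x = g st x) :
    ∀ (l : List α) (init : σ), l.foldl f init = l.foldl g init := by
  intro l
  induction l with
  | nil => intro init; rfl
  | cons x xs ih => intro init; simp only [List.foldl_cons, h, ih]

theorem foldl_foldl_flatMap {α β σ : Type} (f : σ → β → σ) (inner : α → List β) :
    ∀ (l : List α) (init : σ),
      l.foldl (fun st i => (inner i).foldl f st) init = (l.flatMap inner).foldl f init := by
  intro l
  induction l with
  | nil => intro init; rfl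
  | cons x xs ih => intro init; simp only [List.foldl_cons, List.flatMap_cons, List.foldl_append, ih]

theorem csc1_eq_foldl (n : Int) : csc1 n = ((qsL n).foldl step ((0 : Int), ([] : List Int))).1 := by
  unfold csc1 qsL
  rw [← foldl_foldl_flatMap step (fun i => (PySem.List.pyRange (i + 1) n 1).map (fun j => qf i j))]
  congr 1
  apply foldl_ext
  intro st i
  rw [List.foldl_map]
  rfl

-- the fold's running sum is the sum of the distinct values seen so far
theorem foldl_step_sum :
    ∀ (l : List Int) (s : Int) (nods : List Int), nods.Nodup → s = ∑ x ∈ nods.toFinset, x →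
      (l.foldl step (s, nods)).1 = ∑ x ∈ (nods ++ l).toFinset, x := by
  intro l
  induction l with
  | nil => intro s nods _ hs; simpa using hs
  | cons q qs ih =>
    intro s nods hnd hs
    by_cases hq : q ∈ nods
    · have hstep : step (s, nods) q = (s, nods) := by simp [step, hq]
      rw [List.foldl_cons, hstep, ih s nods hnd hs]
      congr 1
      ext x
      simp only [List.toFinset_append, List.toFinset_cons, Finset.mem_union, Finset.mem_insert]
      constructor
      · rintro (h | h)
        · exact Or.inl h
        · exact Or.inr (Or.inr h)
      · rintro (h | h | h)
        · exact Or.inl h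
        · exact Or.inl (by rw [h]; exact List.mem_toFinset.mpr hq)
        · exact Or.inr h
    · have hstep : step (s, nods) q = (s + q, nods ++ [q]) := by simp [step, hq]
      rw [List.foldl_cons, hstep,
        ih (s + q) (nods ++ [q])
          (by simp [List.nodup_append, hnd]; exact fun a ha he => hq (he ▸ ha)) ?_]
      · congr 1
        rw [List.append_assoc]
        rfl
      · rw [List.toFinset_append]
        simp only [List.toFinset_cons, List.toFinset_nil, insert_empty_eq]
        rw [Finset.union_comm, ← Finset.insert_eq]
        rw [Finset.sum_insert (by simpa using hq), hs]
        ring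

-- ---- the set of values ----

theorem mem_qsL (n x : Int) :
    x ∈ qsL n ↔ ∃ i j : ℤ, 1 ≤ i ∧ i < j ∧ j < n ∧ x = qf i j := by
  simp only [qsL, List.mem_flatMap, List.mem_map, PySem.List.mem_pyRange_one]
  constructor
  · rintro ⟨i, ⟨hi1, hin⟩, j, ⟨hj1, hjn⟩, rfl⟩
    exact ⟨i, j, hi1, by omega, hjn, rfl⟩
  · rintro ⟨i, j, hi1, hij, hjn, rfl⟩
    exact ⟨i, ⟨hi1, by omega⟩, j, ⟨by omega, hjn⟩, rfl⟩

theorem qf_eq (a b : ℕ) :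
    qf (a : ℤ) (b : ℤ) = ((Nat.gcd (2 ^ a + 1) (2 ^ b + 1) : ℕ) : ℤ) := by
  unfold qf
  rw [Int.toNat_natCast, Int.toNat_natCast]
  rw [nod_eq _ _ (by positivity)]
  have h1 : (2 : ℤ) ^ a + 1 = ((2 ^ a + 1 : ℕ) : ℤ) := by push_cast; ring
  have h2 : (2 : ℤ) ^ b + 1 = ((2 ^ b + 1 : ℕ) : ℤ) := by push_cast; ring
  rw [h1, h2, Int.gcd_natCast_natCast]

theorem qf_pair (g : ℕ) (hg : 1 ≤ g) : qf (g : ℤ) ((3 * g : ℕ) : ℤ) = (2 : Int) ^ g + 1 := by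
  rw [qf_eq, gcd_two_pow g (3 * g) hg (by omega)]
  have h : Nat.gcd g (3 * g) = g := Nat.gcd_eq_left ⟨3, by ring⟩
  have h3 : 3 * g / g = 3 := Nat.mul_div_left 3 (by omega)
  rw [h, Nat.div_self (by omega), h3]
  rw [if_pos ⟨by decide, by decide⟩]
  push_cast; ring

theorem qf_one_two : qf (1 : ℤ) (2 : ℤ) = 1 := by
  have h : qf ((1 : ℕ) : ℤ) ((2 : ℕ) : ℤ) = ((Nat.gcd (2 ^ 1 + 1) (2 ^ 2 + 1) : ℕ) : ℤ) := qf_eq 1 2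
  rw [gcd_two_pow 1 2 (by omega) (by omega)] at h
  norm_num at h
  simpa using h

theorem toFinset_qsL (n : Int) : (qsL n).toFinset = targetF n := by
  ext x
  rw [List.mem_toFinset, mem_qsL]
  unfold targetF
  by_cases hn3 : 3 ≤ n
  · rw [if_pos hn3]
    simp only [Finset.mem_insert, Finset.mem_image, Finset.mem_Icc]
    constructor
    · rintro ⟨i, j, hi1, hij, hjn, rfl⟩
      obtain ⟨A, rfl⟩ : ∃ A : ℕ, i = (A : ℤ) := ⟨i.toNat, by omega⟩
      obtain ⟨B, rfl⟩ : ∃ B : ℕ, j = (B : ℤ) := ⟨j.toNat, by omega⟩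
      have hA1 : 1 ≤ A := by exact_mod_cast hi1
      have hAB : A < B := by exact_mod_cast hij
      rw [qf_eq, gcd_two_pow A B hA1 (by omega)]
      set G := Nat.gcd A B with hG
      have hG0 : 0 < G := Nat.gcd_pos_of_pos_left B (by omega)
      by_cases hodd : Odd (A / G) ∧ Odd (B / G)
      · right
        refine ⟨G, ⟨hG0, ?_⟩, by rw [if_pos hodd]; push_cast; ring⟩
        have hGB : G ∣ B := Nat.gcd_dvd_right A B
        have hGA : G ∣ A := Nat.gcd_dvd_left A B
        have hlt : A / G < B / G := Nat.div_lt_div_of_lt_of_dvd hGB hAB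
        have hu1 : 1 ≤ A / G := (Nat.one_le_div_iff hG0).mpr (Nat.le_of_dvd (by omega) hGA)
        have hv3 : 3 ≤ B / G := by
          obtain ⟨c, hc⟩ := hodd.2
          omega
        have h3G : 3 * G ≤ B := by
          calc 3 * G ≤ (B / G) * G := Nat.mul_le_mul_right G hv3
          _ = B := Nat.div_mul_cancel hGB
        have hBn : (B : ℤ) < n := hjn
        omega
      · left
        rw [if_neg hodd]
        norm_num
    · rintro (rfl | ⟨g, ⟨hg1, hgm⟩, rfl⟩)
      · exact ⟨1, 2, by omega, by omega, by omega, qf_one_two.symm⟩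
      · refine ⟨(g : ℤ), ((3 * g : ℕ) : ℤ), by exact_mod_cast hg1, by push_cast; omega, ?_,
          (qf_pair g hg1).symm⟩
        push_cast
        omega
  · rw [if_neg hn3]
    simp only [Finset.notMem_empty, iff_false]
    rintro ⟨i, j, hi1, hij, hjn, rfl⟩
    omega

-- ---- summing the target set gives B's closed form ----

theorem sum_geom (m : ℕ) : (∑ g ∈ Finset.Icc 1 m, ((2 : ℤ) ^ g + 1)) = 2 ^ (m + 1) - 2 + m := by
  induction m with
  | zero => simp
  | succ m ih =>
    rw [Finset.sum_Icc_succ_top (by omega), ih]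
    push_cast
    ring

theorem sum_targetF (n : Int) : (∑ x ∈ targetF n, x) = csc1_alt n := by
  unfold targetF csc1_alt
  by_cases hn3 : 3 ≤ n
  · rw [if_pos hn3, if_neg (by omega)]
    have hm : PySem.Int.floordiv (n - 1) 3 = (n - 1) / 3 :=
      PySem.Int.floordiv_eq_ediv_of_pos (by omega)
    rw [Finset.sum_insert ?notmem]
    case notmem =>
      simp only [Finset.mem_image, Finset.mem_Icc]
      rintro ⟨g, _, hg⟩
      have : (1 : ℤ) ≤ 2 ^ g := one_le_pow₀ (by omega)
      omega
    rw [Finset.sum_image ?inj]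
    case inj =>
      intro g1 _ g2 _ h
      have h2 : (2 : ℤ) ^ g1 = 2 ^ g2 := by simpa using h
      by_contra hne
      rcases Nat.lt_or_ge g1 g2 with hlt | hge
      · have := pow_lt_pow_right₀ (by norm_num : (1:ℤ) < 2) hlt
        omega
      · have := pow_lt_pow_right₀ (by norm_num : (1:ℤ) < 2) (by omega : g2 < g1)
        omega
    rw [sum_geom, hm]
    show 1 + (2 ^ (((n - 1) / 3).toNat + 1) - 2 + (((n - 1) / 3).toNat : ℤ)) =
      1 + (n - 1) / 3 + (2 ^ ((n - 1) / 3 + 1).toNat - 2)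
    have ht : ((n - 1) / 3 + 1).toNat = ((n - 1) / 3).toNat + 1 := by omega
    have hc : ((((n - 1) / 3).toNat : ℕ) : ℤ) = (n - 1) / 3 := by omega
    rw [ht, hc]
    ring
  · rw [if_neg hn3, if_pos (by omega)]
    simp

-- ===== VERDICT (by name: the statement is the Claim_ definition above) =====
theorem csc1_spec : Claim_equal_csc1 := by
  intro n _
  show csc1 n = csc1_alt n
  rw [csc1_eq_foldl, foldl_step_sum (qsL n) 0 [] (by simp) (by simp)]
  simpa [toFinset_qsL] using sum_targetF n
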